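-- pv_equiv track=rewrite | github.com/p8ul/python-algorithms | others/anagram-with-cache.py | string_anagram
-- ===== SOURCE A (Python) =====
-- from collections import Counter, defaultdict
--
-- def is_anagram(a, b):
--     a = Counter(a)
--     b = Counter(b)
--     return a.items() == b.items()
--
-- def cache(arr):
--     # store all anagrams together to avoid looping thro all the dictionaries
--     # with the first anagram as the key of others
--     # e.g if arr=['heater', 'cold', 'clod', 'cold', 'reheat', 'docl']
--     # anagrams = {'heater': ['reheat'], 'cold': ['clod', 'cold', 'docl']}
--     #
--     anagrams = {}
--     visited = []
--     for i in range(len(arr)):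
--         if arr[i] in visited:
--             continue
--         visited.append(arr[i])
--         anagrams[arr[i]] = []
--
--         for j in range(1, len(arr)):
--             if i == j:  # don't compare self
--                 continue
--             if is_anagram(arr[i], arr[j]):
--                 visited.append(arr[j])
--                 anagrams[arr[i]].append(arr[j])
--     return anagrams
--
-- def string_anagram(search_list, query):
--     search_anagrams = cache(search_list)
--
--     checked = {}
--     res = []
--
--     for i in range(len(query)):
--         total = 0
--         # ensure that you don't calculate total anagrams
--         if query[i] in checked.keys():
--             res.append(checked[query[i]])
--             continue
--         for j in search_anagrams.keys():
--             if is_anagram(query[i], j):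
--                 total = total + len(search_anagrams[j]) + 1
--         res.append(total)
--         checked[query[i]] = total
--     return res
-- ===== SOURCE B (Python) =====
-- from collections import Counter
--
-- def string_anagram(search_list, query):
--     counts = Counter(''.join(sorted(w)) for w in search_list)
--     return [counts[''.join(sorted(q))] for q in query]
-- ===== Notes on version B (the rewrite author's own statement) =====
-- stated objective: faster
-- what changed: B replaces A's quadratic anagram-grouping cache (pairwise Counter comparisons plus a visited list) by a single Counter keyed by each word's sorted-character canonical form, answering every query with one dictionary lookup.
import Mathlib
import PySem

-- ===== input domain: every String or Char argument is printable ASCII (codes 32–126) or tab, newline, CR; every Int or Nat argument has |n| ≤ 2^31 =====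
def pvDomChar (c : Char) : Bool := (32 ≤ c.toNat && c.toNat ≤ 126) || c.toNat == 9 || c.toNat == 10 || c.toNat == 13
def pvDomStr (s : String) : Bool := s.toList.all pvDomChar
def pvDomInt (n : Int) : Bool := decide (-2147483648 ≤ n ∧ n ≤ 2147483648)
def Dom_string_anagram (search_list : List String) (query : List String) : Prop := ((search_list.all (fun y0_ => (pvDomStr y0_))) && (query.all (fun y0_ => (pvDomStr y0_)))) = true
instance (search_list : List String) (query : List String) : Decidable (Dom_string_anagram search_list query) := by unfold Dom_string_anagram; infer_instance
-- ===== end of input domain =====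

-- B replaces A's quadratic anagram-grouping cache by one Counter keyed by each word's
-- sorted-character canonical form (objective: faster, asymptotically).

-- ===== PORT A =====
-- is_anagram: Counter(a).items() == Counter(b).items(); Python's ItemsView `==` is
-- set equality, ported as mutual membership of the two items lists.
def pyIsAnagram (a : String) (b : String) : Bool :=
  let ca := PySem.Dict.counter a.toList
  let cb := PySem.Dict.counter b.toList
  (ca.items.all (fun p => cb.items.contains p)) && (cb.items.all (fun p => ca.items.contains p))

-- body of cache's inner `for j in range(1, len(arr))` loop
def cacheInner (arr : List String) (i : Int) (ai : String)
    (st : PySem.Dict String (List String) × List String) (j : Int) :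
    PySem.Dict String (List String) × List String :=
  if i == j then st
  else
    let aj := PySem.List.pyGetD arr j ""
    if pyIsAnagram ai aj then (st.1.modify ai [] (fun l => l ++ [aj]), st.2 ++ [aj])
    else st

-- body of cache's outer `for i in range(len(arr))` loop; state = (anagrams, visited)
def cacheOuter (arr : List String)
    (st : PySem.Dict String (List String) × List String) (i : Int) :
    PySem.Dict String (List String) × List String :=
  let ai := PySem.List.pyGetD arr i ""
  if ai ∈ st.2 then st
  else
    (PySem.List.pyRange 1 (PySem.List.len arr)).foldl (cacheInner arr i ai)
      (st.1.insert ai [], st.2 ++ [ai])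

def pyCache (arr : List String) : PySem.Dict String (List String) :=
  ((PySem.List.pyRange 0 (PySem.List.len arr)).foldl (cacheOuter arr)
    (PySem.Dict.empty, [])).1

-- the `for j in search_anagrams.keys(): total += …` accumulation
def queryTotal (sa : PySem.Dict String (List String)) (q : String) : Int :=
  sa.keys.foldl
    (fun t j => if pyIsAnagram q j then t + ((sa.getD j []).length : Int) + 1 else t) 0

-- body of the `for i in range(len(query))` loop; state = (checked, res)
def queryStep (sa : PySem.Dict String (List String))
    (st : PySem.Dict String Int × List Int) (qi : String) :
    PySem.Dict String Int × List Int :=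
  if st.1.contains qi then (st.1, st.2 ++ [st.1.getD qi 0])
  else
    let total := queryTotal sa qi
    (st.1.insert qi total, st.2 ++ [total])

def string_anagram (search_list : List String) (query : List String) : List Int :=
  let sa := pyCache search_list
  ((PySem.List.pyRange 0 (PySem.List.len query)).foldl
      (fun st i => queryStep sa st (PySem.List.pyGetD query i ""))
      (PySem.Dict.empty, [])).2

-- ===== PORT B =====
-- ''.join(sorted(w)): the canonical sorted-character form of a word
def canonKey (s : String) : String := String.ofList (PySem.List.sorted s.toList (fun c => c))

def string_anagram_alt (search_list : List String) (query : List String) : List Int :=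
  let counts : PySem.Dict String Int := PySem.Dict.counter (search_list.map canonKey)
  query.map (fun q => counts.getD (canonKey q) 0)

-- ===== PRECONDITION & SPEC =====
def Spec_string_anagram (search_list : List String) (query : List String) (out : List Int) : Prop := out = string_anagram_alt search_list query
instance (search_list : List String) (query : List String) (out : List Int) : Decidable (Spec_string_anagram search_list query out) := by unfold Spec_string_anagram; infer_instance

-- ===== CLAIM (what is proved, stated in full; the proofs are below) =====
def Claim_equal_string_anagram : Prop := ∀ (search_list : List String) (query : List String), Dom_string_anagram search_list query → Spec_string_anagram search_list query (string_anagram search_list query)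

-- ===== LEMMAS AND PROOFS =====

-- number of words in arr that are anagrams of s (the value both programs compute per query)
def cntA (arr : List String) (s : String) : Nat :=
  arr.countP (fun w => canonKey w == canonKey s)

lemma canonKey_eq_iff (a b : String) :
    canonKey a = canonKey b ↔ a.toList.Perm b.toList := by
  unfold canonKey
  rw [String.ofList_inj, PySem.List.sorted_id_eq_sorted_id_iff_perm]

lemma pyIsAnagram_iff (a b : String) :
    pyIsAnagram a b = true ↔ canonKey a = canonKey b := by
  rw [canonKey_eq_iff, List.perm_iff_count]
  simp only [pyIsAnagram, Bool.and_eq_true, List.all_eq_true, List.contains_iff_mem]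
  constructor
  · rintro ⟨h1, h2⟩ c
    by_cases hca : c ∈ a.toList
    · have hp : (c, (a.toList.count c : Int)) ∈ (PySem.Dict.counter a.toList).items := by
        rw [PySem.Dict.items_counter]
        exact List.mem_map.mpr ⟨c, (PySem.Set.mem_ofList _ _).mpr hca, rfl⟩
      have hm := h1 _ hp
      rw [PySem.Dict.items_counter] at hm
      obtain ⟨k, _, he⟩ := List.mem_map.mp hm
      rw [Prod.mk.injEq] at he
      obtain ⟨rfl, e2⟩ := he
      exact (Nat.cast_inj.mp e2).symm
    · rw [List.count_eq_zero.mpr hca]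
      by_cases hcb : c ∈ b.toList
      · have hp : (c, (b.toList.count c : Int)) ∈ (PySem.Dict.counter b.toList).items := by
          rw [PySem.Dict.items_counter]
          exact List.mem_map.mpr ⟨c, (PySem.Set.mem_ofList _ _).mpr hcb, rfl⟩
        have hm := h2 _ hp
        rw [PySem.Dict.items_counter] at hm
        obtain ⟨k, hk, he⟩ := List.mem_map.mp hm
        rw [Prod.mk.injEq] at he
        obtain ⟨rfl, _⟩ := he
        exact absurd ((PySem.Set.mem_ofList _ _).mp hk) hca
      · rw [List.count_eq_zero.mpr hcb]
  · intro h
    refine ⟨?_, ?_⟩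
    · intro p hp
      rw [PySem.Dict.items_counter] at hp
      obtain ⟨k, hk, rfl⟩ := List.mem_map.mp hp
      rw [PySem.Dict.items_counter]
      have hka : k ∈ a.toList := (PySem.Set.mem_ofList _ _).mp hk
      have hkb : k ∈ b.toList := by
        rw [← List.count_pos_iff, ← h k]
        exact List.count_pos_iff.mpr hka
      exact List.mem_map.mpr ⟨k, (PySem.Set.mem_ofList _ _).mpr hkb, by rw [h k]⟩
    · intro p hp
      rw [PySem.Dict.items_counter] at hp
      obtain ⟨k, hk, rfl⟩ := List.mem_map.mp hp
      rw [PySem.Dict.items_counter]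
      have hkb : k ∈ b.toList := (PySem.Set.mem_ofList _ _).mp hk
      have hka : k ∈ a.toList := by
        rw [← List.count_pos_iff, h k]
        exact List.count_pos_iff.mpr hkb
      exact List.mem_map.mpr ⟨k, (PySem.Set.mem_ofList _ _).mpr hka, by rw [h k]⟩

lemma pyIsAnagram_eq (a b : String) :
    pyIsAnagram a b = (canonKey a == canonKey b) := by
  by_cases h : canonKey a = canonKey b
  · simp [h, (pyIsAnagram_iff a b).mpr h]
  · rcases hb : pyIsAnagram a b with _ | _
    · simp [h]
    · exact absurd ((pyIsAnagram_iff a b).mp hb) h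

lemma cntA_congr (arr : List String) {s t : String}
    (h : canonKey s = canonKey t) : cntA arr s = cntA arr t := by
  unfold cntA; rw [h]

-- B-side closed form
lemma alt_eq (sl q : List String) :
    string_anagram_alt sl q = q.map (fun s => (cntA sl s : Int)) := by
  unfold string_anagram_alt
  refine List.map_congr_left (fun s _ => ?_)
  rw [PySem.Dict.getD_counter, List.count_eq_countP, List.countP_map]
  rfl

-- countP over an index range equals countP over the list
lemma countP_pyRange (arr : List String) (p : String → Bool) :
    (PySem.List.pyRange 0 (PySem.List.len arr)).countP
      (fun j => p (PySem.List.pyGetD arr j "")) = arr.countP p := by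
  conv_rhs => rw [← PySem.List.map_pyGetD_pyRange_zero arr ""]
  rw [List.countP_map]; rfl

-- dropping one marked element from a Nodup list lowers the count by one
lemma countP_erase_one {L : List Int} {i : Int} {B : Int → Bool}
    (hnd : L.Nodup) (hi : i ∈ L) (hB : B i = true) :
    L.countP (fun j => !(i == j) && B j) + 1 = L.countP B := by
  induction L with
  | nil => cases hi
  | cons hd t ih =>
    rcases List.mem_cons.mp hi with rfl | hmem
    · have ht : ∀ j ∈ t, (!(i == j) && B j) = B j := by
        intro j hj
        have hne : i ≠ j := fun e => (List.nodup_cons.mp hnd).1 (e ▸ hj)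
        simp [beq_eq_false_iff_ne.mpr hne]
      rw [List.countP_cons, List.countP_cons]
      rw [List.countP_congr (fun x hx => by rw [ht x hx])]
      simp [hB]
    · have hne : i ≠ hd := fun e => (List.nodup_cons.mp hnd).1 (e ▸ hmem)
      rw [List.countP_cons, List.countP_cons]
      have hh : (!(i == hd) && B hd) = B hd := by simp [beq_eq_false_iff_ne.mpr hne]
      rw [hh]
      have := ih (List.nodup_cons.mp hnd).2 hmem
      omega

-- the strings appended by one full inner scan
def innerAdds (arr : List String) (i : Int) (ai : String) (L : List Int) : List String :=
  (L.filter (fun j => !(i == j) && pyIsAnagram ai (PySem.List.pyGetD arr j ""))).map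
    (fun j => PySem.List.pyGetD arr j "")

lemma cacheInner_eq_self (arr : List String) (i : Int) (ai : String) (st) (j : Int)
    (h : (!(i == j) && pyIsAnagram ai (PySem.List.pyGetD arr j "")) = false) :
    cacheInner arr i ai st j = st := by
  simp only [cacheInner]
  rcases Bool.and_eq_false_iff.mp h with h1 | h1
  · simp only [Bool.not_eq_false'] at h1
    rw [if_pos h1]
  · by_cases h2 : (i == j) = true
    · rw [if_pos h2]
    · rw [if_neg h2, if_neg (by rw [h1]; exact Bool.false_ne_true)]

lemma cacheInner_eq_upd (arr : List String) (i : Int) (ai : String) (st) (j : Int)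
    (h : (!(i == j) && pyIsAnagram ai (PySem.List.pyGetD arr j "")) = true) :
    cacheInner arr i ai st j =
      (st.1.modify ai [] (fun l => l ++ [PySem.List.pyGetD arr j ""]),
       st.2 ++ [PySem.List.pyGetD arr j ""]) := by
  have h' := h
  simp only [Bool.and_eq_true, Bool.not_eq_eq_eq_not, Bool.not_true,
    beq_eq_false_iff_ne, ne_eq] at h'
  obtain ⟨h1, h2⟩ := h'
  simp only [cacheInner]
  rw [if_neg (fun hh => h1 (by simpa using hh)), if_pos h2]

lemma innerAdds_cons (arr : List String) (i : Int) (ai : String) (j : Int) (t : List Int) :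
    innerAdds arr i ai (j :: t) =
      (if (!(i == j) && pyIsAnagram ai (PySem.List.pyGetD arr j "")) = true
        then [PySem.List.pyGetD arr j ""] else [])
        ++ innerAdds arr i ai t := by
  unfold innerAdds
  rw [List.filter_cons]
  split <;> simp

lemma inner_snd (arr : List String) (i : Int) (ai : String) :
    ∀ (L : List Int) st,
      (L.foldl (cacheInner arr i ai) st).2 = st.2 ++ innerAdds arr i ai L := by
  intro L
  induction L with
  | nil => intro st; simp [innerAdds]
  | cons j t ih =>
    intro st
    rw [List.foldl_cons, ih, innerAdds_cons]
    rcases hc : (!(i == j) && pyIsAnagram ai (PySem.List.pyGetD arr j "")) with _ | _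
    · rw [cacheInner_eq_self arr i ai st j hc]; simp
    · rw [cacheInner_eq_upd arr i ai st j hc]; simp

lemma inner_fst_getD_self (arr : List String) (i : Int) (ai : String) :
    ∀ (L : List Int) st,
      (L.foldl (cacheInner arr i ai) st).1.getD ai []
        = st.1.getD ai [] ++ innerAdds arr i ai L := by
  intro L
  induction L with
  | nil => intro st; simp [innerAdds]
  | cons j t ih =>
    intro st
    rw [List.foldl_cons, ih, innerAdds_cons]
    rcases hc : (!(i == j) && pyIsAnagram ai (PySem.List.pyGetD arr j "")) with _ | _
    · rw [cacheInner_eq_self arr i ai st j hc]; simp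
    · rw [cacheInner_eq_upd arr i ai st j hc]
      simp [PySem.Dict.getD_modify_self]

lemma inner_fst_getD_ne (arr : List String) (i : Int) (ai : String) {k : String}
    (hk : k ≠ ai) :
    ∀ (L : List Int) st,
      (L.foldl (cacheInner arr i ai) st).1.getD k [] = st.1.getD k [] := by
  intro L
  induction L with
  | nil => intro st; rfl
  | cons j t ih =>
    intro st
    rw [List.foldl_cons, ih]
    rcases hc : (!(i == j) && pyIsAnagram ai (PySem.List.pyGetD arr j "")) with _ | _
    · rw [cacheInner_eq_self arr i ai st j hc]
    · rw [cacheInner_eq_upd arr i ai st j hc]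
      exact PySem.Dict.getD_modify_of_ne st.1 [] _ hk

lemma inner_keys (arr : List String) (i : Int) (ai : String) :
    ∀ (L : List Int) st, st.1.contains ai = true →
      (L.foldl (cacheInner arr i ai) st).1.keys = st.1.keys := by
  intro L
  induction L with
  | nil => intro st _; rfl
  | cons j t ih =>
    intro st hcont
    rw [List.foldl_cons]
    rcases hc : (!(i == j) && pyIsAnagram ai (PySem.List.pyGetD arr j "")) with _ | _
    · rw [cacheInner_eq_self arr i ai st j hc, ih st hcont]
    · rw [cacheInner_eq_upd arr i ai st j hc]
      have hk : (st.1.modify ai [] (fun l => l ++ [PySem.List.pyGetD arr j ""])).keys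
          = st.1.keys := by
        rw [PySem.Dict.keys_modify, PySem.Dict.keys_insert_of_contains _ _ hcont]
      have hc2 : (st.1.modify ai [] (fun l => l ++ [PySem.List.pyGetD arr j ""])).contains ai
          = true := by
        rw [PySem.Dict.contains_eq_decide_mem_keys, hk, decide_eq_true_eq]
        rw [PySem.Dict.contains_eq_decide_mem_keys, decide_eq_true_eq] at hcont
        exact hcont
      rw [ih _ hc2]
      exact hk

lemma mem_innerAdds {arr : List String} {i : Int} {ai : String} {L : List Int} {x : String} :
    x ∈ innerAdds arr i ai L ↔
      ∃ j ∈ L, ¬ i = j ∧ pyIsAnagram ai (PySem.List.pyGetD arr j "") = true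
        ∧ PySem.List.pyGetD arr j "" = x := by
  unfold innerAdds
  simp only [List.mem_map, List.mem_filter, Bool.and_eq_true, Bool.not_eq_eq_eq_not,
    Bool.not_true, beq_eq_false_iff_ne, ne_eq]
  constructor
  · rintro ⟨j, ⟨hjL, hne, hana⟩, hx⟩; exact ⟨j, hjL, hne, hana, hx⟩
  · rintro ⟨j, hjL, hne, hana, hx⟩; exact ⟨j, ⟨hjL, hne, hana⟩, hx⟩

-- the invariant carried through cache's outer loop
def OuterInv (arr : List String) (m : Nat)
    (st : PySem.Dict String (List String) × List String) : Prop :=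
  ((st.1.keys.map canonKey).Nodup)
  ∧ (∀ k ∈ st.1.keys, k ∈ st.2)
  ∧ (∀ x ∈ st.2, ∃ k ∈ st.1.keys, canonKey k = canonKey x)
  ∧ (∀ j : Nat, j < m → ∃ k ∈ st.1.keys, canonKey k = canonKey (arr.getD j ""))
  ∧ (∀ k ∈ st.1.keys, (st.1.getD k []).length + 1 = cntA arr k)
  ∧ (∀ j : Nat, 1 ≤ j → j < arr.length →
      (∃ k ∈ st.1.keys, canonKey k = canonKey (arr.getD j "")) → arr.getD j "" ∈ st.2)
  ∧ (0 < m → arr.getD 0 "" ∈ st.2)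
  ∧ (∀ k ∈ st.1.keys, ∃ j : Nat, j < m ∧ arr.getD j "" = k)

lemma pyGetD_natCast_getD (arr : List String) (j : Nat) (hj : j < arr.length) :
    PySem.List.pyGetD arr (j : Int) "" = arr.getD j "" := by
  rw [PySem.List.pyGetD_eq_getElem arr "" (by positivity) (by exact_mod_cast hj)]
  rw [List.getD_eq_getElem _ _ hj]
  simp

lemma innerAdds_length (arr : List String) (m : Nat) (hm : m < arr.length)
    (h0 : m ≠ 0 → canonKey (arr.getD 0 "") ≠ canonKey (arr.getD m "")) :
    (innerAdds arr (m : Int) (arr.getD m "") (PySem.List.pyRange 1 (PySem.List.len arr))).length + 1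
      = cntA arr (arr.getD m "") := by
  set ai := arr.getD m "" with hai
  have hlenA : PySem.List.len arr = (arr.length : Int) := rfl
  have hn : (0:Int) < PySem.List.len arr := by
    rw [hlenA]; exact_mod_cast Nat.lt_of_le_of_lt (Nat.zero_le m) hm
  have hget0 : PySem.List.pyGetD arr 0 "" = arr.getD 0 "" := by
    have h00 := pyGetD_natCast_getD arr 0 (Nat.lt_of_le_of_lt (Nat.zero_le m) hm)
    simpa using h00
  have hgetm : PySem.List.pyGetD arr (m:Int) "" = ai := pyGetD_natCast_getD arr m hm
  unfold innerAdds
  rw [List.length_map, ← List.countP_eq_length_filter]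
  have hcnt : cntA arr ai
      = (PySem.List.pyRange 0 (PySem.List.len arr)).countP
          (fun j => canonKey (PySem.List.pyGetD arr j "") == canonKey ai) :=
    (countP_pyRange arr (fun w => canonKey w == canonKey ai)).symm
  rw [hcnt, PySem.List.pyRange_one_cons hn, List.countP_cons]
  have hBeq : ∀ j : Int, (pyIsAnagram ai (PySem.List.pyGetD arr j ""))
      = (canonKey (PySem.List.pyGetD arr j "") == canonKey ai) := by
    intro j; rw [pyIsAnagram_eq]; exact Bool.beq_comm
  by_cases hm0 : m = 0
  · subst hm0
    have ht : (canonKey (PySem.List.pyGetD arr 0 "") == canonKey ai) = true := by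
      rw [hget0, ← hai]; exact beq_self_eq_true _
    have hcong : (PySem.List.pyRange 1 (PySem.List.len arr)).countP
        (fun j => !(((0:Nat):Int) == j) && pyIsAnagram ai (PySem.List.pyGetD arr j ""))
        = (PySem.List.pyRange 1 (PySem.List.len arr)).countP
            (fun j => canonKey (PySem.List.pyGetD arr j "") == canonKey ai) := by
      apply List.countP_congr
      intro j hj
      have h1 : (1:Int) ≤ j := (PySem.List.mem_pyRange_one.mp hj).1
      have hne : (((0:Nat):Int) == j) = false := beq_eq_false_iff_ne.mpr (by omega)
      rw [hne, hBeq j]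
      simp
    rw [hcong, ht]
    norm_num
  · have hf : (canonKey (PySem.List.pyGetD arr 0 "") == canonKey ai) = false := by
      rw [hget0]; exact beq_eq_false_iff_ne.mpr (h0 hm0)
    rw [hf]
    have hmemL : ((m:Nat):Int) ∈ PySem.List.pyRange 1 (PySem.List.len arr) := by
      rw [PySem.List.mem_pyRange_one, hlenA]
      constructor
      · exact_mod_cast Nat.one_le_iff_ne_zero.mpr hm0
      · exact_mod_cast hm
    have hBm : pyIsAnagram ai (PySem.List.pyGetD arr ((m:Nat):Int) "") = true := by
      rw [hgetm, pyIsAnagram_eq]; exact beq_self_eq_true _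
    have herase := countP_erase_one
      (B := fun j => pyIsAnagram ai (PySem.List.pyGetD arr j ""))
      (PySem.List.nodup_pyRange_one 1 (PySem.List.len arr)) hmemL hBm
    have hc2 : (PySem.List.pyRange 1 (PySem.List.len arr)).countP
        (fun j => pyIsAnagram ai (PySem.List.pyGetD arr j ""))
        = (PySem.List.pyRange 1 (PySem.List.len arr)).countP
            (fun j => canonKey (PySem.List.pyGetD arr j "") == canonKey ai) :=
      List.countP_congr (fun j _ => by rw [hBeq j])
    have h01 : (0:Int) + 1 = (1:Int) := by norm_num
    rw [h01, ← hc2, ← herase]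
    simp

lemma outer_inv (arr : List String) :
    ∀ m : Nat, m ≤ arr.length →
      OuterInv arr m ((PySem.List.pyRange 0 (m : Int)).foldl (cacheOuter arr)
        (PySem.Dict.empty, [])) := by
  intro m
  induction m with
  | zero =>
    intro _
    rw [show ((0:Nat):Int) = (0:Int) from rfl, PySem.List.pyRange_one_eq_nil le_rfl,
      List.foldl_nil]
    refine ⟨by simp [PySem.Dict.keys_empty], ?_, ?_, ?_, ?_, ?_, ?_, ?_⟩
    · intro k hk; rw [PySem.Dict.keys_empty] at hk; cases hk
    · intro x hx; cases hx
    · intro j hj; omega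
    · intro k hk; rw [PySem.Dict.keys_empty] at hk; cases hk
    · intro j _ _ h; obtain ⟨k, hk, -⟩ := h; rw [PySem.Dict.keys_empty] at hk; cases hk
    · intro h; omega
    · intro k hk; rw [PySem.Dict.keys_empty] at hk; cases hk
  | succ m ih =>
    intro hm1
    have hm : m < arr.length := hm1
    have hcast : ((m+1 : Nat) : Int) = ((m:Nat) : Int) + 1 := by push_cast; ring
    rw [hcast, PySem.List.pyRange_one_succ_right (by exact_mod_cast Nat.zero_le m),
      List.foldl_append, List.foldl_cons, List.foldl_nil]
    set st := List.foldl (cacheOuter arr) (PySem.Dict.empty, [])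
      (PySem.List.pyRange 0 ((m:Nat):Int)) with hstdef
    obtain ⟨K1, K2, K3, K4, K5, K6, K7, K8⟩ := ih (Nat.le_of_lt hm1)
    have hai : PySem.List.pyGetD arr ((m:Nat):Int) "" = arr.getD m "" :=
      pyGetD_natCast_getD arr m hm
    by_cases hvis : arr.getD m "" ∈ st.2
    · have hskip : cacheOuter arr st ((m:Nat):Int) = st := by
        simp only [cacheOuter, hai]
        rw [if_pos hvis]
      rw [hskip]
      refine ⟨K1, K2, K3, ?_, K5, K6, ?_, ?_⟩
      · intro j hj
        rcases Nat.lt_succ_iff_lt_or_eq.mp hj with hj' | rfl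
        · exact K4 j hj'
        · exact K3 _ hvis
      · intro _
        rcases Nat.eq_zero_or_pos m with h0 | hpos
        · subst h0; exact hvis
        · exact K7 hpos
      · intro k hk
        obtain ⟨j, hj, he⟩ := K8 k hk
        exact ⟨j, Nat.lt_succ_of_lt hj, he⟩
    · set ai := arr.getD m "" with haidef
      have hstep : cacheOuter arr st ((m:Nat):Int)
          = (PySem.List.pyRange 1 (PySem.List.len arr)).foldl
              (cacheInner arr ((m:Nat):Int) ai) (st.1.insert ai [], st.2 ++ [ai]) := by
        simp only [cacheOuter, hai]
        rw [if_neg hvis]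
      rw [hstep]
      set F := (PySem.List.pyRange 1 (PySem.List.len arr)).foldl
        (cacheInner arr ((m:Nat):Int) ai) (st.1.insert ai [], st.2 ++ [ai]) with hFdef
      have hfreshK : ai ∉ st.1.keys := fun h => hvis (K2 _ h)
      have hfreshC : ∀ k ∈ st.1.keys, canonKey k ≠ canonKey ai := by
        intro k hk hc
        rcases Nat.eq_zero_or_pos m with h0 | hpos
        · obtain ⟨j, hj, -⟩ := K8 k hk
          subst h0
          exact absurd hj (by omega)
        · exact hvis (K6 m hpos hm ⟨k, hk, hc⟩)
      have hcontIns : (st.1.insert ai ([] : List String)).contains ai = true := by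
        rw [PySem.Dict.contains_eq_decide_mem_keys, decide_eq_true_eq,
          PySem.Dict.mem_keys_insert]
        exact Or.inl rfl
      have hkeysIns : (st.1.insert ai ([] : List String)).keys = st.1.keys ++ [ai] :=
        PySem.Dict.keys_insert_of_not_contains _ _
          (by rw [PySem.Dict.contains_eq_decide_mem_keys]; exact decide_eq_false hfreshK)
      have hKeys : F.1.keys = st.1.keys ++ [ai] := by
        rw [hFdef, inner_keys arr _ ai _ _ hcontIns, hkeysIns]
      have hVis : F.2 = (st.2 ++ [ai])
          ++ innerAdds arr ((m:Nat):Int) ai (PySem.List.pyRange 1 (PySem.List.len arr)) := by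
        rw [hFdef, inner_snd]
      have hgSelf : F.1.getD ai []
          = innerAdds arr ((m:Nat):Int) ai (PySem.List.pyRange 1 (PySem.List.len arr)) := by
        rw [hFdef, inner_fst_getD_self, PySem.Dict.getD_insert_self]
        simp
      have hgNe : ∀ k, k ≠ ai → F.1.getD k [] = st.1.getD k [] := by
        intro k hk
        rw [hFdef, inner_fst_getD_ne arr _ ai hk, PySem.Dict.getD_insert_of_ne _ _ _ hk]
      have h0ne : m ≠ 0 → canonKey (arr.getD 0 "") ≠ canonKey (arr.getD m "") := by
        intro hm0 hc
        have hpos : 0 < m := Nat.pos_of_ne_zero hm0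
        obtain ⟨k, hk, hck⟩ := K3 _ (K7 hpos)
        exact hfreshC k hk (hck.trans hc)
      have hlen := innerAdds_length arr m hm h0ne
      rw [← haidef] at hlen
      have hmemAdds : ∀ x ∈ innerAdds arr ((m:Nat):Int) ai
          (PySem.List.pyRange 1 (PySem.List.len arr)), canonKey ai = canonKey x := by
        intro x hx
        obtain ⟨j, -, -, hana, hxe⟩ := mem_innerAdds.mp hx
        rw [← hxe]
        exact (pyIsAnagram_iff _ _).mp hana
      refine ⟨?_, ?_, ?_, ?_, ?_, ?_, ?_, ?_⟩
      · -- K1: canonical keys stay distinct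
        rw [hKeys, List.map_append]
        refine List.Nodup.append K1 (List.nodup_singleton _) ?_
        intro c hc1 hc2
        simp only [List.map_cons, List.map_nil, List.mem_singleton] at hc2
        obtain ⟨k, hk, rfl⟩ := List.mem_map.mp hc1
        exact hfreshC k hk hc2
      · -- K2: keys are visited
        intro k hk
        rw [hKeys] at hk
        rw [hVis]
        rcases List.mem_append.mp hk with hk | hk
        · exact List.mem_append.mpr (Or.inl (List.mem_append.mpr (Or.inl (K2 k hk))))
        · rw [List.mem_singleton] at hk
          subst hk
          exact List.mem_append.mpr (Or.inl (List.mem_append.mpr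
            (Or.inr (List.mem_singleton.mpr rfl))))
      · -- K3: every visited string is an anagram of a key
        intro x hx
        rw [hVis] at hx
        rw [hKeys]
        rcases List.mem_append.mp hx with hx | hx
        · rcases List.mem_append.mp hx with hx | hx
          · obtain ⟨k, hk, hck⟩ := K3 x hx
            exact ⟨k, List.mem_append.mpr (Or.inl hk), hck⟩
          · rw [List.mem_singleton] at hx
            subst hx
            exact ⟨ai, List.mem_append.mpr (Or.inr (List.mem_singleton.mpr rfl)), rfl⟩
        · exact ⟨ai, List.mem_append.mpr (Or.inr (List.mem_singleton.mpr rfl)),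
            hmemAdds x hx⟩
      · -- K4: processed prefix is covered by the keys
        intro j hj
        rw [hKeys]
        rcases Nat.lt_succ_iff_lt_or_eq.mp hj with hj' | rfl
        · obtain ⟨k, hk, hck⟩ := K4 j hj'
          exact ⟨k, List.mem_append.mpr (Or.inl hk), hck⟩
        · exact ⟨ai, List.mem_append.mpr (Or.inr (List.mem_singleton.mpr rfl)),
            haidef ▸ rfl⟩
      · -- K5: each key's bucket counts its whole anagram class
        intro k hk
        rw [hKeys] at hk
        rcases List.mem_append.mp hk with hk | hk
        · have hne : k ≠ ai := fun e => hfreshK (e ▸ hk)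
          rw [hgNe k hne]
          exact K5 k hk
        · rw [List.mem_singleton] at hk
          subst hk
          rw [hgSelf]
          exact hlen
      · -- K6: anagrams (at index ≥ 1) of any key are visited
        intro j hj1 hj2 hex
        rw [hKeys] at hex
        rw [hVis]
        obtain ⟨k, hk, hck⟩ := hex
        rcases List.mem_append.mp hk with hk | hk
        · exact List.mem_append.mpr (Or.inl (List.mem_append.mpr
            (Or.inl (K6 j hj1 hj2 ⟨k, hk, hck⟩))))
        · rw [List.mem_singleton] at hk
          subst hk
          by_cases hjm : j = m
          · subst hjm
            rw [← haidef]
            exact List.mem_append.mpr (Or.inl (List.mem_append.mpr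
              (Or.inr (List.mem_singleton.mpr rfl))))
          · refine List.mem_append.mpr (Or.inr (mem_innerAdds.mpr
              ⟨(j : Int), ?_, ?_, ?_, ?_⟩))
            · rw [PySem.List.mem_pyRange_one]
              refine ⟨by exact_mod_cast hj1, ?_⟩
              rw [show PySem.List.len arr = ((arr.length:Nat):Int) from rfl]
              exact_mod_cast hj2
            · intro he
              exact hjm (by exact_mod_cast he.symm)
            · rw [pyGetD_natCast_getD arr j hj2, pyIsAnagram_eq]
              exact beq_iff_eq.mpr hck
            · exact pyGetD_natCast_getD arr j hj2
      · -- K7: arr[0] is visited once anything is processed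
        intro _
        rw [hVis]
        rcases Nat.eq_zero_or_pos m with h0 | hpos
        · subst h0
          rw [← haidef]
          exact List.mem_append.mpr (Or.inl (List.mem_append.mpr
            (Or.inr (List.mem_singleton.mpr rfl))))
        · exact List.mem_append.mpr (Or.inl (List.mem_append.mpr (Or.inl (K7 hpos))))
      · -- K8: every key occurs in the processed prefix
        intro k hk
        rw [hKeys] at hk
        rcases List.mem_append.mp hk with hk | hk
        · obtain ⟨j, hj, he⟩ := K8 k hk
          exact ⟨j, Nat.lt_succ_of_lt hj, he⟩
        · rw [List.mem_singleton] at hk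
          subst hk
          exact ⟨m, Nat.lt_succ_self m, haidef.symm⟩

-- queryTotal, unfolded to a sum over the matching keys
lemma foldl_total (s : String) (g : String → Int) :
    ∀ (ks : List String) (t : Int),
      ks.foldl (fun t k => if pyIsAnagram s k then t + g k else t) t
        = t + ((ks.filter (fun k => canonKey k == canonKey s)).map g).sum := by
  intro ks
  induction ks with
  | nil => intro t; simp
  | cons h tl ih =>
    intro t
    rw [List.foldl_cons, List.filter_cons]
    have hsym : pyIsAnagram s h = (canonKey h == canonKey s) := by
      rw [pyIsAnagram_eq]; exact Bool.beq_comm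
    by_cases hc : canonKey h = canonKey s
    · simp only [hsym, hc, BEq.rfl, if_true, List.map_cons, List.sum_cons, ih]; ring_nf
    · simp only [hsym, beq_eq_false_iff_ne.mpr hc, Bool.false_eq_true, if_false, ih]

lemma queryTotal_eq (arr : List String) (s : String) :
    queryTotal (pyCache arr) s = (cntA arr s : Int) := by
  have hinv := outer_inv arr arr.length le_rfl
  unfold OuterInv at hinv
  obtain ⟨K1, -, -, K4, K5, -, -, -⟩ := hinv
  have hpc : ((PySem.List.pyRange 0 ((arr.length : Nat) : Int)).foldl (cacheOuter arr)
      (PySem.Dict.empty, [])).1 = pyCache arr := rfl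
  rw [hpc] at K1 K4 K5
  unfold queryTotal
  have hbody : (fun (t : Int) (j : String) =>
        if pyIsAnagram s j = true then t + (((pyCache arr).getD j []).length : Int) + 1 else t)
      = (fun (t : Int) (j : String) =>
        if pyIsAnagram s j = true then t + ((((pyCache arr).getD j []).length : Int) + 1) else t) := by
    funext t j
    split
    · ring
    · rfl
  rw [hbody, foldl_total s (fun j => (((pyCache arr).getD j []).length : Int) + 1)
    (pyCache arr).keys 0]
  simp only [zero_add]
  rcases hF : (pyCache arr).keys.filter (fun k => canonKey k == canonKey s) with _ | ⟨k0, rest⟩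
  · have hz : cntA arr s = 0 := by
      by_contra hnz
      have hpos : 0 < cntA arr s := Nat.pos_of_ne_zero hnz
      obtain ⟨w, hw, hpw⟩ := List.countP_pos_iff.mp hpos
      obtain ⟨j, hj, hje⟩ := List.getElem_of_mem hw
      have hjd : arr.getD j "" = w := by rw [List.getD_eq_getElem _ _ hj, hje]
      obtain ⟨k, hk, hck⟩ := K4 j hj
      have hmemF : k ∈ (pyCache arr).keys.filter (fun k => canonKey k == canonKey s) :=
        List.mem_filter.mpr ⟨hk, by rw [beq_iff_eq, hck, hjd]; exact beq_iff_eq.mp hpw⟩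
      rw [hF] at hmemF
      cases hmemF
    rw [hz]
    simp
  · have hk0F : k0 ∈ (pyCache arr).keys.filter (fun k => canonKey k == canonKey s) := by
      rw [hF]; exact List.mem_cons_self
    obtain ⟨hk0k, hk0c⟩ := List.mem_filter.mp hk0F
    have hrest : rest = [] := by
      by_contra hne
      obtain ⟨r, t, rfl⟩ := List.exists_cons_of_ne_nil hne
      have hrmem : r ∈ (pyCache arr).keys.filter (fun k => canonKey k == canonKey s) := by
        rw [hF]; exact List.mem_cons_of_mem _ List.mem_cons_self
      obtain ⟨_, hrc⟩ := List.mem_filter.mp hrmem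
      have hsubl := List.filter_sublist (p := fun k => canonKey k == canonKey s)
        (l := (pyCache arr).keys)
      have hnd : (((pyCache arr).keys.filter
          (fun k => canonKey k == canonKey s)).map canonKey).Nodup :=
        K1.sublist (hsubl.map canonKey)
      rw [hF] at hnd
      have hne2 := (List.nodup_cons.mp hnd).1
      apply hne2
      have : canonKey k0 = canonKey r := by
        rw [beq_iff_eq.mp hk0c, ← beq_iff_eq.mp hrc]
      rw [this]
      exact List.mem_map.mpr ⟨r, List.mem_cons_self, rfl⟩
    subst hrest
    simp only [List.map_cons, List.map_nil, List.sum_cons, List.sum_nil, add_zero]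
    have h5 := K5 k0 hk0k
    have hcc := cntA_congr arr (beq_iff_eq.mp hk0c)
    omega

lemma query_fold (sa : PySem.Dict String (List String)) (f : String → Int)
    (H : ∀ s, queryTotal sa s = f s) :
    ∀ (qs : List String) (checked : PySem.Dict String Int) (res : List Int),
      (∀ s v, checked.get? s = some v → v = f s) →
      (qs.foldl (queryStep sa) (checked, res)).2 = res ++ qs.map f := by
  intro qs
  induction qs with
  | nil => intro checked res _; simp
  | cons q qs ih =>
    intro checked res hc
    by_cases hcont : checked.contains q = true
    · have hsome : (checked.get? q).isSome = true := by
        rw [← PySem.Dict.contains_eq_isSome_get?]; exact hcont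
      obtain ⟨v, hv⟩ := Option.isSome_iff_exists.mp hsome
      have hg : checked.getD q 0 = v := by simp [PySem.Dict.getD, hv]
      have hstep : queryStep sa (checked, res) q = (checked, res ++ [checked.getD q 0]) := by
        simp [queryStep, hcont]
      rw [List.foldl_cons, hstep, ih checked _ hc, hg, hc q v hv]
      simp
    · rw [Bool.not_eq_true] at hcont
      have hstep : queryStep sa (checked, res) q
          = (checked.insert q (queryTotal sa q), res ++ [queryTotal sa q]) := by
        simp [queryStep, hcont]
      have hinv : ∀ s v, ((checked.insert q (queryTotal sa q)).get? s = some v → v = f s) := by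
        intro s v hv
        by_cases hsq : s = q
        · subst hsq
          rw [PySem.Dict.get?_insert_self] at hv
          cases hv
          exact H s
        · rw [PySem.Dict.get?_insert_of_ne _ _ hsq] at hv
          exact hc s v hv
      rw [List.foldl_cons, hstep, ih _ _ hinv, H q]
      simp

lemma a_eq (sl q : List String) :
    string_anagram sl q = q.map (fun s => (cntA sl s : Int)) := by
  simp only [string_anagram]
  rw [PySem.List.foldl_pyRange_zero_pyGetD q "" (queryStep (pyCache sl)) (PySem.Dict.empty, [])]
  rw [query_fold (pyCache sl) (fun s => (cntA sl s : Int)) (queryTotal_eq sl) q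
    PySem.Dict.empty [] (fun s v hv => by rw [PySem.Dict.get?_empty] at hv; cases hv)]
  simp

-- ===== VERDICT (by name: the statement is the Claim_ definition above) =====
theorem string_anagram_spec : Claim_equal_string_anagram := by
  intro sl q _
  unfold Spec_string_anagram
  rw [a_eq, alt_eq]
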